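-- pv_equiv track=rewrite | github.com/rajendrapandey95/LeetCode | 2024/December/2593. Find Score of an Array After Marking All Elements.py | findScore
-- ===== SOURCE A (Python) =====
-- def findScore(nums: list[int]) -> int:
--     n = len(nums)
--     marked = [False] * n
--     score = 0
--
--     sorted_nums = sorted((value, idx) for idx, value in enumerate(nums))
--
--     for value, idx in sorted_nums:
--         if not marked[idx]:
--             score += value
--             marked[idx] = True
--             if idx > 0:
--                 marked[idx - 1] = True
--             if idx < n - 1:
--                 marked[idx + 1] = True
--
--     return score
-- ===== SOURCE B (Python) =====
-- def findScore(nums: list[int]) -> int: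
--     items = list(enumerate(nums))
--     score = 0
--     while items:
--         idx, value = min(items, key=lambda p: (p[1], p[0]))
--         score += value
--         items = [p for p in items if abs(p[0] - idx) > 1]
--     return score
-- ===== Notes on version B (the rewrite author's own statement) =====
-- stated objective: alternative
-- what changed: Replaces A's sort-then-scan with a boolean marked array by a shrinking worklist: repeatedly extract the (value, index)-minimal remaining pair with min() and drop every pair within distance 1 of its index, so there is no sort and no marking state at all.
import Mathlib
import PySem

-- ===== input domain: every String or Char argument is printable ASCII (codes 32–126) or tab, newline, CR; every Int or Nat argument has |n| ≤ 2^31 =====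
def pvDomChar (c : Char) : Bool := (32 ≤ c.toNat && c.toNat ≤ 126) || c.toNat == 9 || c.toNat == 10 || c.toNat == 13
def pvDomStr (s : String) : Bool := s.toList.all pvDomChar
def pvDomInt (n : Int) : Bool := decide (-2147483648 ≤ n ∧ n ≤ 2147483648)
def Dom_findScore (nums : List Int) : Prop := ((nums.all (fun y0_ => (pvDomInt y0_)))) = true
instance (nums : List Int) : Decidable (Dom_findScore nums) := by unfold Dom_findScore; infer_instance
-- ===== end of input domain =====

-- B replaces A's sort-then-scan with a marked array by a shrinking worklist: repeatedly
-- extract the (value, index)-minimal remaining pair and drop every pair within distance 1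
-- of its index; no sort and no marking state (objective: alternative, not faster — B is
-- quadratic in the worst case where A sorts once).

-- ===== PORT A =====
-- loop body of A: reads marked[idx] (always in range), writes marked[idx], marked[idx-1] if idx>0, marked[idx+1] if idx<n-1
def pvStepA (n : Int) (st : Int × List Bool) (p : Int × Int) : Int × List Bool :=
  if PySem.List.pyGetD st.2 p.2 true = false then
    let m1 := PySem.List.pySetD st.2 p.2 true
    let m2 := if p.2 > 0 then PySem.List.pySetD m1 (p.2 - 1) true else m1
    let m3 := if p.2 < n - 1 then PySem.List.pySetD m2 (p.2 + 1) true else m2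
    (st.1 + p.1, m3)
  else st

def findScore (nums : List Int) : Int :=
  let n : Int := PySem.List.len nums
  let marked : List Bool := List.replicate nums.length false
  let sorted_nums := PySem.List.sorted2 ((PySem.List.enumerate nums).map (fun p => (p.2, p.1)))
      (fun p => p.1) (fun p => p.2)
  (sorted_nums.foldl (pvStepA n) ((0 : Int), marked)).1

-- ===== PORT B =====
-- termination fact for B's while loop: min(items, …) is a member of items
def pvMStep (a : Option (Int × Int)) (x : Int × Int) : Option (Int × Int) :=
  match a with
  | none => some x
  | some b => if (decide (x.2 < b.2) || !decide (b.2 < x.2) && decide (x.1 < b.1)) then some x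
      else some b

lemma pvMin2_eq_foldl (l : List (Int × Int)) :
    PySem.List.min2? l (fun p => p.2) (fun p => p.1) = l.foldl pvMStep none := by
  unfold PySem.List.min2?
  congr 1
  funext a x
  cases a <;> rfl

lemma pvMin2_mem (l : List (Int × Int)) (m : Int × Int)
    (h : PySem.List.min2? l (fun p => p.2) (fun p => p.1) = some m) : m ∈ l := by
  rw [pvMin2_eq_foldl] at h
  have aux : ∀ (l' : List (Int × Int)) (a : Option (Int × Int)),
      List.foldl pvMStep a l' = some m → a = some m ∨ m ∈ l' := by
    intro l'
    induction l' with
    | nil => intro a h'; exact Or.inl h'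
    | cons x rest ih =>
      intro a h'
      rw [List.foldl_cons] at h'
      rcases ih _ h' with h2 | h2
      · match a with
        | none =>
          simp only [pvMStep] at h2
          exact Or.inr (by simp [← Option.some_inj.mp h2])
        | some b =>
          simp only [pvMStep] at h2
          split at h2
          · exact Or.inr (by simp [← Option.some_inj.mp h2])
          · exact Or.inl h2
      · exact Or.inr (List.mem_cons_of_mem _ h2)
  rcases aux l none h with h2 | h2
  · exact absurd h2 (by simp)
  · exact h2

def pvLoopB (items : List (Int × Int)) (score : Int) : Int :=
  match h : PySem.List.min2? items (fun p => p.2) (fun p => p.1) with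
  | none => score
  | some m =>
    pvLoopB (items.filter (fun p => decide (|p.1 - m.1| > 1))) (score + m.2)
termination_by items.length
decreasing_by
  rw [List.length_unattach]
  exact lt_of_lt_of_eq
    (List.length_filter_lt_length_iff_exists.mpr
      ⟨⟨m, pvMin2_mem _ _ h⟩, List.mem_attach _ _, by simp⟩)
    List.length_attach

def findScore_alt (nums : List Int) : Int :=
  pvLoopB (PySem.List.enumerate nums) 0

-- ===== PRECONDITION & SPEC =====
def Spec_findScore (nums : List Int) (out : Int) : Prop := out = findScore_alt nums
instance (nums : List Int) (out : Int) : Decidable (Spec_findScore nums out) := by unfold Spec_findScore; infer_instance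

-- ===== CLAIM (what is proved, stated in full; the proofs are below) =====
def Claim_equal_findScore : Prop := ∀ (nums : List Int), Dom_findScore nums → Spec_findScore nums (findScore nums)

-- ===== LEMMAS AND PROOFS =====

-- the comparator A's sort and B's min both use: strict lexicographic order on (value, index)
def pvBef (a b : Int × Int) : Bool :=
  decide (a.1 < b.1) || (!decide (b.1 < a.1) && decide (a.2 < b.2))

lemma pvBef_iff (a b : Int × Int) :
    pvBef a b = true ↔ (a.1 < b.1 ∨ (¬ b.1 < a.1 ∧ a.2 < b.2)) := by
  simp [pvBef]

lemma pvBef_asymm (a b : Int × Int) (h : pvBef a b = true) : pvBef b a = false := by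
  rw [pvBef_iff] at h
  rw [← Bool.not_eq_true, pvBef_iff]
  omega

lemma pvBef_trans (a b c : Int × Int) (h1 : pvBef a b = true) (h2 : pvBef b c = true) :
    pvBef a c = true := by
  rw [pvBef_iff] at *
  omega

lemma pvBef_total (a b : Int × Int) (hne : a ≠ b) (h : pvBef a b = false) : pvBef b a = true := by
  rw [← Bool.not_eq_true, pvBef_iff] at h
  rw [pvBef_iff]
  have : ¬ (a.1 = b.1 ∧ a.2 = b.2) := fun hc => hne (Prod.ext hc.1 hc.2)
  omega

-- insertion into a pvBef-sorted list keeps it sorted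
lemma pvInsertBy_pairwise (x : Int × Int) (l : List (Int × Int))
    (h : l.Pairwise (fun a b => pvBef b a = false)) :
    (PySem.List.insertBy pvBef x l).Pairwise (fun a b => pvBef b a = false) := by
  induction l with
  | nil => simp [PySem.List.insertBy]
  | cons y ys ih =>
    rw [List.pairwise_cons] at h
    by_cases hxy : pvBef x y = true
    · rw [PySem.List.insertBy, if_pos hxy]
      refine List.pairwise_cons.mpr ⟨?_, List.pairwise_cons.mpr h⟩
      intro z hz
      rcases List.mem_cons.mp hz with hz | hz
      · rw [hz]; exact pvBef_asymm _ _ hxy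
      · by_contra hzx
        rw [Bool.not_eq_false] at hzx
        have := pvBef_trans _ _ _ hzx hxy
        rw [h.1 z hz] at this
        exact Bool.false_ne_true this
    · rw [PySem.List.insertBy, if_neg hxy]
      refine List.pairwise_cons.mpr ⟨?_, ih h.2⟩
      intro z hz
      rcases (PySem.List.mem_insertBy _ _ _ _).mp hz with hz | hz
      · rw [hz, ← Bool.not_eq_true]; exact hxy
      · exact h.1 z hz

lemma pvSorted2_pairwise (xs : List (Int × Int)) :
    (PySem.List.sorted2 xs (fun p => p.1) (fun p => p.2) false).Pairwise
      (fun a b => pvBef b a = false) := by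
  show (List.foldl (fun acc x => PySem.List.insertBy pvBef x acc) [] xs).Pairwise _
  have aux : ∀ (l : List (Int × Int)) (acc : List (Int × Int)),
      acc.Pairwise (fun a b => pvBef b a = false) →
      (List.foldl (fun acc x => PySem.List.insertBy pvBef x acc) acc l).Pairwise
        (fun a b => pvBef b a = false) := by
    intro l
    induction l with
    | nil => intro acc h; exact h
    | cons x rest ih => intro acc h; exact ih _ (pvInsertBy_pairwise x acc h)
  exact aux xs [] (by simp)

-- B's min over swapped pairs, as pvBef on the (value, index) originals
def pvBefT (x y : Int × Int) : Bool := pvBef (x.2, x.1) (y.2, y.1)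

lemma pvMStep_some (b x : Int × Int) :
    pvMStep (some b) x = if pvBefT x b = true then some x else some b := rfl

lemma pvMin2_unique (l : List (Int × Int)) (m : Int × Int) (hm : m ∈ l)
    (hu : ∀ q ∈ l, q ≠ m → pvBefT m q = true) :
    PySem.List.min2? l (fun p => p.2) (fun p => p.1) = some m := by
  rw [pvMin2_eq_foldl]
  have L1 : ∀ (l' : List (Int × Int)), (∀ q ∈ l', pvBefT q m = false) →
      List.foldl pvMStep (some m) l' = some m := by
    intro l'
    induction l' with
    | nil => intro _; rfl
    | cons x rest ih =>
      intro h
      have hx : pvBefT x m = false := h x (by simp)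
      rw [List.foldl_cons, pvMStep_some, if_neg (by rw [hx]; exact Bool.false_ne_true)]
      exact ih (fun q hq => h q (by simp [hq]))
  have hrest : ∀ q ∈ l, pvBefT q m = false := by
    intro q hq
    by_cases hqm : q = m
    · rw [hqm, ← Bool.not_eq_true, pvBefT, pvBef_iff]; omega
    · exact pvBef_asymm _ _ (hu q hq hqm)
  have L2 : ∀ (l' : List (Int × Int)), (∀ q ∈ l', pvBefT q m = false) →
      (∀ q ∈ l', q ≠ m → pvBefT m q = true) → m ∈ l' →
      ∀ (a : Option (Int × Int)), (a = none ∨ ∃ x, a = some x ∧ pvBefT m x = true) →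
      List.foldl pvMStep a l' = some m := by
    intro l'
    induction l' with
    | nil => intro _ _ hm'; exact absurd hm' (by simp)
    | cons x rest ih =>
      intro hall hu' hm' a ha
      rw [List.foldl_cons]
      by_cases hxm : x = m
      · subst hxm
        have hacc : pvMStep a x = some x := by
          rcases ha with ha | ⟨y, hay, hy⟩
          · rw [ha]; rfl
          · rw [hay, pvMStep_some, if_pos hy]
        rw [hacc]
        exact L1 rest (fun q hq => hall q (by simp [hq]))
      · have hmx : pvBefT m x = true := hu' x (by simp) hxm
        have hacc : ∃ y, pvMStep a x = some y ∧ pvBefT m y = true := by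
          rcases ha with ha | ⟨z, haz, hz⟩
          · exact ⟨x, by rw [ha]; rfl, hmx⟩
          · rw [haz, pvMStep_some]
            by_cases hc : pvBefT x z = true
            · exact ⟨x, by rw [if_pos hc], hmx⟩
            · exact ⟨z, by rw [if_neg hc], hz⟩
        obtain ⟨y, hy1, hy2⟩ := hacc
        rw [hy1]
        have hmrest : m ∈ rest := by
          rcases List.mem_cons.mp hm' with h | h
          · exact absurd h.symm hxm
          · exact h
        exact ih (fun q hq => hall q (by simp [hq]))
          (fun q hq hqm => hu' q (by simp [hq]) hqm) hmrest _ (Or.inr ⟨y, rfl, hy2⟩)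
  exact L2 l hrest hu hm none (Or.inl rfl)

-- greedy with an explicit picked-index set (bridge between the two ports)
def pvStepG (st : Int × PySem.Set Int) (p : Int × Int) : Int × PySem.Set Int :=
  if PySem.Set.isdisjoint st.2 [p.2 - 1, p.2, p.2 + 1] then
    (st.1 + p.1, PySem.Set.add st.2 p.2)
  else st

-- invariant: marked[k] is set exactly when some picked index is within distance 1 of k
def pvInv (marked : List Bool) (picked : List Int) : Prop :=
  ∀ (k : Nat), k < marked.length →
    (PySem.List.pyGetD marked (k : Int) false = true ↔
      ((k : Int) - 1 ∈ picked ∨ (k : Int) ∈ picked ∨ (k : Int) + 1 ∈ picked))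

lemma pvFold_eq (N : Nat) (l : List (Int × Int))
    (hl : ∀ p ∈ l, ∃ k : Nat, k < N ∧ p.2 = (k : Int)) :
    ∀ (marked : List Bool) (picked : List Int) (score : Int),
      marked.length = N → pvInv marked picked →
      (l.foldl (pvStepA (N : Int)) (score, marked)).1 = (l.foldl pvStepG (score, picked)).1 := by
  induction l with
  | nil => intro marked picked score _ _; rfl
  | cons p t ih =>
    intro marked picked score hlen hinv
    obtain ⟨k, hk, hp2⟩ := hl p (by simp)
    have hlt : ∀ q ∈ t, ∃ k : Nat, k < N ∧ q.2 = (k : Int) := fun q hq => hl q (by simp [hq])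
    have hkm : k < marked.length := by omega
    have hcondA : (PySem.List.pyGetD marked p.2 true = false) ↔
        ¬ ((k : Int) - 1 ∈ picked ∨ (k : Int) ∈ picked ∨ (k : Int) + 1 ∈ picked) := by
      rw [hp2]
      have e : PySem.List.pyGetD marked ((k : Nat) : Int) true
          = PySem.List.pyGetD marked ((k : Nat) : Int) false := by
        rw [PySem.List.pyGetD_natCast, PySem.List.pyGetD_natCast,
          List.getD_eq_getElem _ _ hkm, List.getD_eq_getElem _ _ hkm]
      rw [e, ← hinv k hkm]
      simp
    have hcondB : (PySem.Set.isdisjoint picked [p.2 - 1, p.2, p.2 + 1] = true) ↔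
        ¬ ((k : Int) - 1 ∈ picked ∨ (k : Int) ∈ picked ∨ (k : Int) + 1 ∈ picked) := by
      rw [hp2]
      constructor
      · intro hd hmem
        rw [PySem.Set.isdisjoint_iff] at hd
        rcases hmem with h | h | h
        · exact hd _ h (by simp)
        · exact hd _ h (by simp)
        · exact hd _ h (by simp)
      · intro hnot
        rw [PySem.Set.isdisjoint_iff]
        intro x hx hmem
        simp only [List.mem_cons, List.not_mem_nil, or_false] at hmem
        rcases hmem with h | h | h <;> subst h
        · exact hnot (Or.inl hx)
        · exact hnot (Or.inr (Or.inl hx))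
        · exact hnot (Or.inr (Or.inr hx))
    by_cases hc : ((k : Int) - 1 ∈ picked ∨ (k : Int) ∈ picked ∨ (k : Int) + 1 ∈ picked)
    · have hA : pvStepA (N : Int) (score, marked) p = (score, marked) := by
        unfold pvStepA
        rw [if_neg]
        intro h; exact (hcondA.mp h) hc
      have hB : pvStepG (score, picked) p = (score, picked) := by
        unfold pvStepG
        rw [if_neg]
        intro h; exact (hcondB.mp h) hc
      simp only [List.foldl_cons, hA, hB]
      exact ih hlt marked picked score hlen hinv
    · have hA0 : PySem.List.pyGetD marked p.2 true = false := hcondA.mpr hc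
      have hB0 : PySem.Set.isdisjoint picked [p.2 - 1, p.2, p.2 + 1] = true := hcondB.mpr hc
      set m1 := PySem.List.pySetD marked p.2 true with hm1
      set m2 := if p.2 > 0 then PySem.List.pySetD m1 (p.2 - 1) true else m1 with hm2
      set m3 := if p.2 < (N : Int) - 1 then PySem.List.pySetD m2 (p.2 + 1) true else m2 with hm3
      have hA : pvStepA (N : Int) (score, marked) p = (score + p.1, m3) := by
        unfold pvStepA
        rw [if_pos hA0]
      have hB : pvStepG (score, picked) p = (score + p.1, PySem.Set.add picked p.2) := by
        unfold pvStepG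
        rw [if_pos hB0]
      simp only [List.foldl_cons, hA, hB]
      have hlen1 : m1.length = N := by
        rw [hm1, hp2, PySem.List.pySetD_natCast, List.length_set]; exact hlen
      have hlen2 : m2.length = N := by
        rw [hm2]; split
        next hpos =>
          rw [show p.2 - 1 = ((k - 1 : Nat) : Int) by rw [hp2] at hpos ⊢; omega]
          rw [PySem.List.pySetD_natCast, List.length_set]; exact hlen1
        next => exact hlen1
      have hlen3 : m3.length = N := by
        rw [hm3]; split
        next =>
          rw [show p.2 + 1 = ((k + 1 : Nat) : Int) by rw [hp2]; push_cast; ring]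
          rw [PySem.List.pySetD_natCast, List.length_set]; exact hlen2
        next => exact hlen2
      apply ih hlt m3 (PySem.Set.add picked p.2) (score + p.1) hlen3
      intro k' hk3
      have hk'N : k' < N := by omega
      have hk'm : k' < marked.length := by omega
      have g1 : PySem.List.pyGetD m1 (k' : Int) false
          = if k' = k then true else PySem.List.pyGetD marked (k' : Int) false := by
        rw [hm1, hp2]; exact PySem.List.pyGetD_pySetD_natCast marked k k' true false hkm
      have g2 : PySem.List.pyGetD m2 (k' : Int) false
          = if 0 < k ∧ k' = k - 1 then true else PySem.List.pyGetD m1 (k' : Int) false := by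
        rw [hm2]; split
        next hpos =>
          have hkpos : 0 < k := by rw [hp2] at hpos; omega
          rw [show p.2 - 1 = ((k - 1 : Nat) : Int) by rw [hp2]; omega]
          rw [PySem.List.pyGetD_pySetD_natCast m1 (k - 1) k' true false (by omega)]
          by_cases he : k' = k - 1
          · rw [if_pos he, if_pos ⟨hkpos, he⟩]
          · rw [if_neg he, if_neg (by tauto)]
        next hpos =>
          have hk0 : ¬ (0 < k) := by rw [hp2] at hpos; omega
          rw [if_neg (by tauto)]
      have g3 : PySem.List.pyGetD m3 (k' : Int) false
          = if k + 1 < N ∧ k' = k + 1 then true else PySem.List.pyGetD m2 (k' : Int) false := by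
        rw [hm3]; split
        next hpos =>
          have hkN : k + 1 < N := by rw [hp2] at hpos; omega
          rw [show p.2 + 1 = ((k + 1 : Nat) : Int) by rw [hp2]; push_cast; ring]
          rw [PySem.List.pyGetD_pySetD_natCast m2 (k + 1) k' true false (by omega)]
          by_cases he : k' = k + 1
          · rw [if_pos he, if_pos ⟨hkN, he⟩]
          · rw [if_neg he, if_neg (by tauto)]
        next hpos =>
          have hkN : ¬ (k + 1 < N) := by rw [hp2] at hpos; omega
          rw [if_neg (by tauto)]
      have hget : PySem.List.pyGetD m3 (k' : Int) false = true ↔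
          (PySem.List.pyGetD marked (k' : Int) false = true
            ∨ k' = k ∨ (0 < k ∧ k' + 1 = k) ∨ (k + 1 < N ∧ k' = k + 1)) := by
        rw [g3, g2, g1]
        split_ifs with h1 h2 h3
        · exact iff_of_true rfl (Or.inr (Or.inr (Or.inr h1)))
        · exact iff_of_true rfl (Or.inr (Or.inr (Or.inl ⟨h2.1, by omega⟩)))
        · exact iff_of_true rfl (Or.inr (Or.inl h3))
        · constructor
          · exact fun h => Or.inl h
          · rintro (h | h | h | h)
            · exact h
            · exact absurd h h3
            · exact absurd ⟨h.1, by omega⟩ h2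
            · exact absurd h h1
      rw [hget, hinv k' hk'm, hp2]
      simp only [PySem.Set.mem_add]
      constructor
      · rintro (h | h | h | h)
        · rcases h with h | h | h
          · exact Or.inl (Or.inl h)
          · exact Or.inr (Or.inl (Or.inl h))
          · exact Or.inr (Or.inr (Or.inl h))
        · exact Or.inr (Or.inl (Or.inr (by omega)))
        · exact Or.inr (Or.inr (Or.inr (by omega)))
        · exact Or.inl (Or.inr (by omega))
      · rintro (h | h | h)
        · rcases h with h | h
          · exact Or.inl (Or.inl h)
          · right; right; right; omega
        · rcases h with h | h
          · exact Or.inl (Or.inr (Or.inl h))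
          · right; left; omega
        · rcases h with h | h
          · exact Or.inl (Or.inr (Or.inr h))
          · right; right; left; omega

lemma pvLoopB_none (t : List (Int × Int)) (score : Int)
    (h : PySem.List.min2? t (fun p => p.2) (fun p => p.1) = none) : pvLoopB t score = score := by
  rw [pvLoopB.eq_def]
  split
  · rfl
  · next h' => rw [h] at h'; cases h'

lemma pvLoopB_some (t : List (Int × Int)) (score : Int) (m : Int × Int)
    (h : PySem.List.min2? t (fun p => p.2) (fun p => p.1) = some m) :
    pvLoopB t score = pvLoopB (t.filter (fun p => decide (|p.1 - m.1| > 1))) (score + m.2) := by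
  rw [pvLoopB.eq_def]
  split
  · next h' => rw [h] at h'; cases h'
  · next m' h' =>
    rw [h] at h'
    cases h'
    rfl

-- main lemma: the picked-set greedy over the sorted list equals B's worklist loop
lemma pvLoop_eq (s : List (Int × Int)) :
    ∀ (P : PySem.Set Int) (t : List (Int × Int)) (score : Int),
      s.Pairwise (fun a b => pvBef b a = false) →
      (s.map Prod.snd).Nodup →
      t.Perm ((s.filter (fun p => PySem.Set.isdisjoint P [p.2 - 1, p.2, p.2 + 1])).map
        (fun p => (p.2, p.1))) →
      (s.foldl pvStepG (score, P)).1 = pvLoopB t score := by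
  induction s with
  | nil =>
    intro P t score _ _ hperm
    simp only [List.filter_nil, List.map_nil] at hperm
    rw [List.perm_nil.mp hperm, pvLoopB_none _ _ (by rfl)]
    rfl
  | cons p rest ih =>
    intro P t score hpw hnd hperm
    rw [List.pairwise_cons] at hpw
    rw [List.map_cons, List.nodup_cons] at hnd
    by_cases hc : PySem.Set.isdisjoint P [p.2 - 1, p.2, p.2 + 1] = true
    · -- p is pickable: it is the unique minimum of t, both sides take it
      have hfc : List.filter (fun q => PySem.Set.isdisjoint P [q.2 - 1, q.2, q.2 + 1]) (p :: rest)
          = p :: List.filter (fun q => PySem.Set.isdisjoint P [q.2 - 1, q.2, q.2 + 1]) rest := by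
        simp [hc]
      rw [hfc, List.map_cons] at hperm
      have hmem : (p.2, p.1) ∈ t := hperm.mem_iff.mpr (by simp)
      have hmin : PySem.List.min2? t (fun q => q.2) (fun q => q.1) = some (p.2, p.1) := by
        apply pvMin2_unique t (p.2, p.1) hmem
        intro q hq hqne
        have hq' := hperm.mem_iff.mp hq
        rcases List.mem_cons.mp hq' with h | h
        · exact absurd h hqne
        · rw [List.mem_map] at h
          obtain ⟨r, hr, hrq⟩ := h
          have hrrest : r ∈ rest := List.mem_of_mem_filter hr
          have hne : r ≠ p := by
            intro he
            exact hqne (by rw [← hrq, he])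
          have : pvBefT (p.2, p.1) (r.2, r.1) = true := by
            show pvBef p r = true
            exact pvBef_total r p hne (hpw.1 r hrrest)
          rw [← hrq]
          exact this
      rw [pvLoopB_some t score (p.2, p.1) hmin]
      simp only [List.foldl_cons, pvStepG, hc, if_true]
      apply ih (PySem.Set.add P p.2) _ (score + p.1) hpw.2 hnd.2
      -- the filtered worklist matches the filter of rest under the grown picked set
      have h1 := hperm.filter (fun q => decide (|q.1 - p.2| > 1))
      have h2 : (((p.2, p.1) :: (List.filter
            (fun p_1 => PySem.Set.isdisjoint P [p_1.2 - 1, p_1.2, p_1.2 + 1]) rest).map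
            (fun p_1 => (p_1.2, p_1.1))).filter (fun q => decide (|q.1 - p.2| > 1)))
          = ((rest.filter (fun r => PySem.Set.isdisjoint (PySem.Set.add P p.2)
              [r.2 - 1, r.2, r.2 + 1])).map (fun p_1 => (p_1.2, p_1.1))) := by
        rw [List.filter_cons_of_neg (by simp)]
        rw [List.filter_map]
        congr 1
        rw [List.filter_filter]
        apply List.filter_congr
        intro r _
        show (decide (|r.2 - p.2| > 1) && PySem.Set.isdisjoint P [r.2 - 1, r.2, r.2 + 1])
          = PySem.Set.isdisjoint (PySem.Set.add P p.2) [r.2 - 1, r.2, r.2 + 1]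
        rw [Bool.eq_iff_iff, Bool.and_eq_true]
        rw [decide_eq_true_iff, PySem.Set.isdisjoint_iff, PySem.Set.isdisjoint_iff]
        rw [show ((|r.2 - p.2| > 1) ↔ (1 < r.2 - p.2 ∨ 1 < -(r.2 - p.2))) from by
          rw [gt_iff_lt, lt_abs]]
        constructor
        · intro ⟨habs, hdis⟩ x hx hmemx
          rcases PySem.Set.mem_add P p.2 x |>.mp hx with hx' | hx'
          · exact hdis x hx' hmemx
          · subst hx'
            simp only [List.mem_cons, List.not_mem_nil, or_false] at hmemx
            omega
        · intro hdis
          constructor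
          · have hnp := hdis p.2 ((PySem.Set.mem_add P p.2 p.2).mpr (Or.inr rfl))
            simp only [List.mem_cons, List.not_mem_nil, or_false, not_or] at hnp
            omega
          · intro x hx hmemx
            exact hdis x ((PySem.Set.mem_add P p.2 x).mpr (Or.inl hx)) hmemx
      rw [h2] at h1
      exact h1
    · -- p is not pickable: A's fold skips it, and it is absent from t
      have hcf : PySem.Set.isdisjoint P [p.2 - 1, p.2, p.2 + 1] = false := by
        rw [← Bool.not_eq_true]; exact hc
      have hfc : List.filter (fun q => PySem.Set.isdisjoint P [q.2 - 1, q.2, q.2 + 1]) (p :: rest)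
          = List.filter (fun q => PySem.Set.isdisjoint P [q.2 - 1, q.2, q.2 + 1]) rest := by
        simp [hcf]
      rw [hfc] at hperm
      simp only [List.foldl_cons, pvStepG, hc]
      exact ih P t score hpw.2 hnd.2 hperm

-- ===== VERDICT (by name: the statement is the Claim_ definition above) =====
theorem findScore_spec : Claim_equal_findScore := by
  intro nums _
  unfold Spec_findScore findScore findScore_alt
  simp only [PySem.List.len_eq]
  have hperm := PySem.List.sorted2_perm ((PySem.List.enumerate nums).map (fun p => (p.2, p.1)))
    (fun p => p.1) (fun p => p.2) false
  rw [pvFold_eq nums.length _ ?hl (List.replicate nums.length false) [] 0 (by simp) ?hinv]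
  case hl =>
    intro p hp
    have hmem : p ∈ (PySem.List.enumerate nums).map (fun p => (p.2, p.1)) := hperm.mem_iff.mp hp
    simp only [List.mem_map] at hmem
    obtain ⟨q, hq, hqe⟩ := hmem
    rw [PySem.List.mem_enumerate_iff] at hq
    obtain ⟨k, hk, hqk⟩ := hq
    exact ⟨k, hk, by rw [← hqe, hqk]; simp⟩
  case hinv =>
    intro k hk
    simp
  apply pvLoop_eq _ PySem.Set.empty (PySem.List.enumerate nums) 0 (pvSorted2_pairwise _)
  · exact (hperm.map Prod.snd).nodup_iff.mpr (by
      rw [List.map_map]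
      have : ((fun p : Int × Int => p.2) ∘ (fun p : Int × Int => (p.2, p.1)))
          = fun p : Int × Int => p.1 := by funext p; rfl
      rw [this, PySem.List.map_fst_enumerate]
      exact PySem.List.nodup_pyRange_one _ _)
  · have hE : ∀ (l' : List Int),
        PySem.Set.isdisjoint (PySem.Set.empty : PySem.Set Int) l' = true := by
      intro l'
      rw [PySem.Set.isdisjoint_iff]
      intro x hx
      simp [PySem.Set.empty] at hx
    rw [List.filter_eq_self.mpr (fun p _ => hE _)]
    have h2 := (hperm.map (fun p : Int × Int => (p.2, p.1))).symm
    rw [List.map_map] at h2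
    have : ((fun p : Int × Int => (p.2, p.1)) ∘ (fun p : Int × Int => (p.2, p.1)))
        = id := by funext p; rfl
    rw [this, List.map_id] at h2
    exact h2
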